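-- pv_equiv track=rewrite | github.com/wxhhkkkl/myQuant | backend/src/services/model_service.py | _nth_prev_valid
-- ===== SOURCE A (Python) =====
-- def _nth_prev_valid(values, end_idx, n):
--     """Return the nth previous non-None value before end_idx, or None."""
--     count = 0
--     for j in range(end_idx - 1, -1, -1):
--         if values[j] is not None:
--             count += 1
--             if count == n:
--                 return values[j]
--     return None
-- ===== SOURCE B (Python) =====
-- def _nth_prev_valid(values, end_idx, n):
--     """Return the nth previous non-None value before end_idx, or None."""
--     valid = [values[j] for j in range(end_idx) if values[j] is not None]
--     if 1 <= n <= len(valid):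
--         return valid[-n]
--     return None
-- ===== Notes on version B (the rewrite author's own statement) =====
-- stated objective: simpler
-- what changed: Replaces the backward counting scan with an early return by building the forward list of non-None values up to end_idx once and selecting the n-th element from its end.
import Mathlib
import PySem

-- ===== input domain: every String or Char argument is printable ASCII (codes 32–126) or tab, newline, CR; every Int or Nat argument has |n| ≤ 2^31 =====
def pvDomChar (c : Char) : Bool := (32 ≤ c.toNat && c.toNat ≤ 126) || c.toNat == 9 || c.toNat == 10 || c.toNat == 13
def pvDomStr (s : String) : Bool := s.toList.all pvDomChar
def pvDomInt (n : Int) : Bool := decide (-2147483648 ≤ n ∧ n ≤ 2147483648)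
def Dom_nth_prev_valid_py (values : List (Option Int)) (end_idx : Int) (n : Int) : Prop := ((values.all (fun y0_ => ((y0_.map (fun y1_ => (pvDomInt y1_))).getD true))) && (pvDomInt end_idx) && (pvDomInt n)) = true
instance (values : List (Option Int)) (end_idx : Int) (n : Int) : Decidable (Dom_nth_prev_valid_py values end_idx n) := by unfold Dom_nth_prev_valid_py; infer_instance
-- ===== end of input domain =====

-- B replaces A's backward counting scan (early return) by building the forward list of
-- non-None values before end_idx once and indexing it from the end — simpler decomposition.

-- ===== PORT A =====
-- the backward for-loop with `count` and early return, as structural recursion on the countdown range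
def nthPrevLoop (values : List (Option Int)) (n : Int) : List Int → Int → Option Int
  | [], _ => none
  | j :: rest, count =>
    match PySem.List.pyGet? values j with
    | some (some v) => if count + 1 = n then some v else nthPrevLoop values n rest (count + 1)
    | _ => nthPrevLoop values n rest count

def nth_prev_valid_py (values : List (Option Int)) (end_idx : Int) (n : Int) : Option Int :=
  nthPrevLoop values n (PySem.List.pyRange (end_idx - 1) (-1) (-1)) 0

-- ===== PORT B =====
-- valid = [values[j] for j in range(end_idx) if values[j] is not None]
def validList (values : List (Option Int)) (end_idx : Int) : List Int :=
  (PySem.List.pyRange 0 end_idx 1).filterMap (fun j =>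
    match PySem.List.pyGet? values j with
    | some (some v) => some v
    | _ => none)

def nth_prev_valid_py_alt (values : List (Option Int)) (end_idx : Int) (n : Int) : Option Int :=
  if 1 ≤ n ∧ n ≤ ((validList values end_idx).length : Int)
  then PySem.List.pyGet? (validList values end_idx) (-n) else none

-- ===== PRECONDITION & SPEC =====
-- Python A (and B) raise IndexError when the loop runs (0 < end_idx) and the first index
-- accessed, end_idx - 1, is out of range; those inputs are excluded here.
def Pre_nth_prev_valid_py (values : List (Option Int)) (end_idx : Int) (n : Int) : Prop :=
  0 < end_idx → end_idx - 1 < (values.length : Int)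
instance (values : List (Option Int)) (end_idx : Int) (n : Int) : Decidable (Pre_nth_prev_valid_py values end_idx n) := by unfold Pre_nth_prev_valid_py; infer_instance

def pvWitness_nth_prev_valid_py : List (Option Int) × Int × Int := ([some 1, none, some 2], 3, 1)

def Spec_nth_prev_valid_py (values : List (Option Int)) (end_idx : Int) (n : Int) (out : Option Int) : Prop := out = nth_prev_valid_py_alt values end_idx n
instance (values : List (Option Int)) (end_idx : Int) (n : Int) (out : Option Int) : Decidable (Spec_nth_prev_valid_py values end_idx n out) := by unfold Spec_nth_prev_valid_py; infer_instance

-- ===== CLAIM (what is proved, stated in full; the proofs are below) =====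
def Claim_equal_nth_prev_valid_py : Prop := ∀ (values : List (Option Int)) (end_idx : Int) (n : Int), Dom_nth_prev_valid_py values end_idx n → Pre_nth_prev_valid_py values end_idx n → Spec_nth_prev_valid_py values end_idx n (nth_prev_valid_py values end_idx n)

-- ===== LEMMAS AND PROOFS =====

-- proof-side pure version of A's loop, over the (reversed) prefix of values itself
def goR (n : Int) : List (Option Int) → Int → Option Int
  | [], _ => none
  | none :: t, c => goR n t c
  | some v :: t, c => if c + 1 = n then some v else goR n t (c + 1)

lemma loop_eq_goR (values : List (Option Int)) (n : Int) (js : List Int) (c : Int) :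
    nthPrevLoop values n js c
      = goR n (js.map (fun j => (PySem.List.pyGet? values j).bind id)) c := by
  induction js generalizing c with
  | nil => rfl
  | cons j t ih =>
    simp only [nthPrevLoop, List.map]
    cases h : PySem.List.pyGet? values j with
    | none => simp [goR, ih]
    | some o => cases o <;> simp [goR, ih]

lemma goR_eq (n : Int) (R : List (Option Int)) (c : Int) :
    goR n R c
      = if 1 ≤ n - c ∧ n - c ≤ ((R.filterMap id).length : Int)
        then (R.filterMap id)[(n - c - 1).toNat]? else none := by
  induction R generalizing c with
  | nil => simp [goR]
  | cons a t ih =>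
    cases a with
    | none =>
      have hfc : (List.filterMap id (none :: t)) = List.filterMap id t := rfl
      show goR n t c = _
      rw [hfc, ih]
    | some v =>
      have hfc : (List.filterMap id (some v :: t)) = v :: List.filterMap id t := rfl
      show (if c + 1 = n then some v else goR n t (c + 1)) = _
      rw [hfc]
      by_cases hn : c + 1 = n
      · have h1 : n - c = 1 := by omega
        rw [if_pos hn, if_pos]
        · have h0 : (n - c - 1).toNat = 0 := by omega
          rw [h0]; rfl
        · exact ⟨by omega, by simp only [List.length_cons]; push_cast; omega⟩
      · rw [if_neg hn, ih]
        by_cases hc2 : 1 ≤ n - (c + 1) ∧ n - (c + 1) ≤ ((List.filterMap id t).length : Int)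
        · rw [if_pos hc2, if_pos]
          · have hk : (n - c - 1).toNat = (n - (c + 1) - 1).toNat + 1 := by omega
            rw [hk, List.getElem?_cons_succ]
          · simp only [List.length_cons]; push_cast; omega
        · rw [if_neg hc2, if_neg]
          simp only [List.length_cons] at hc2 ⊢
          push_cast at hc2 ⊢
          omega

theorem nth_prev_valid_py_spec : Claim_equal_nth_prev_valid_py := by
  intro values end_idx n _ _
  unfold Spec_nth_prev_valid_py nth_prev_valid_py nth_prev_valid_py_alt validList
  have hf : (fun j => match PySem.List.pyGet? values j with
      | some (some v) => some v
      | _ => none) = fun j => (PySem.List.pyGet? values j).bind id := by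
    funext j; cases h : PySem.List.pyGet? values j with
    | none => simp
    | some o => cases o <;> simp
  rw [hf]
  rw [loop_eq_goR, PySem.List.pyRange_neg_one_eq_reverse]
  have h0 : (-1 : Int) + 1 = 0 := by norm_num
  have hr : end_idx - 1 + 1 = end_idx := by omega
  rw [h0, hr, List.map_reverse, goR_eq]
  have hfm : (((PySem.List.pyRange 0 end_idx 1).map
        (fun j => (PySem.List.pyGet? values j).bind id)).reverse).filterMap id
      = ((PySem.List.pyRange 0 end_idx 1).filterMap
        (fun j => (PySem.List.pyGet? values j).bind id)).reverse := by
    rw [List.filterMap_reverse, List.filterMap_map]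
    rfl
  rw [hfm]
  simp only [sub_zero, List.length_reverse]
  by_cases hc : 1 ≤ n ∧ n ≤ (((PySem.List.pyRange 0 end_idx 1).filterMap
      (fun j => (PySem.List.pyGet? values j).bind id)).length : Int)
  · rw [if_pos hc, if_pos hc]
    set V := (PySem.List.pyRange 0 end_idx 1).filterMap
      (fun j => (PySem.List.pyGet? values j).bind id) with hV
    obtain ⟨h1, h2⟩ := hc
    have hk1 : 0 < n.toNat := by omega
    have hk2 : n.toNat ≤ V.length := by omega
    have hneg : -n = -((n.toNat : Nat) : Int) := by omega
    rw [hneg, PySem.List.pyGet?_neg_natCast V n.toNat hk1 hk2]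
    rw [List.getElem?_reverse (by omega)]
    congr 1
    omega
  · rw [if_neg hc, if_neg hc]

theorem pvWitness_ok : Dom_nth_prev_valid_py pvWitness_nth_prev_valid_py.1 pvWitness_nth_prev_valid_py.2.1 pvWitness_nth_prev_valid_py.2.2 ∧ Pre_nth_prev_valid_py pvWitness_nth_prev_valid_py.1 pvWitness_nth_prev_valid_py.2.1 pvWitness_nth_prev_valid_py.2.2 := by decide
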